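-- pv_equiv track=rewrite | github.com/codebicycle/curiosity-flickr-django | flickr/utils.py | _get_size_suffix
-- ===== SOURCE A (Python) =====
-- SIZES = {75: 's', 150: 'q', 100: 't', 240: 'm', 320: 'n', 500: '-',
--          640: 'z', 800: 'c', 1024: 'b', 1600: 'h', 2048: 'k'}
--
-- def _get_size_suffix(longest_side):
--     if longest_side in SIZES:
--         return SIZES[longest_side]
--
--     desc_ordered_sizes = sorted(SIZES.keys(), reverse=True)
--     for size in desc_ordered_sizes:
--         if longest_side >= size:
--             return SIZES[size]
--     return SIZES[size]
-- ===== SOURCE B (Python) =====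
-- SIZES = {75: 's', 150: 'q', 100: 't', 240: 'm', 320: 'n', 500: '-',
--          640: 'z', 800: 'c', 1024: 'b', 1600: 'h', 2048: 'k'}
--
-- _KEYS = sorted(SIZES)
--
--
-- def _bisect_right(a, x):
--     lo, hi = 0, len(a)
--     while lo < hi:
--         mid = (lo + hi) // 2
--         if x < a[mid]:
--             hi = mid
--         else:
--             lo = mid + 1
--     return lo
--
--
-- def _get_size_suffix(longest_side):
--     i = _bisect_right(_KEYS, longest_side)
--     if i == 0:
--         return SIZES[_KEYS[0]]
--     return SIZES[_KEYS[i - 1]]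
-- ===== Notes on version B (the rewrite author's own statement) =====
-- stated objective: alternative
-- what changed: Replaced A's exact-match dict shortcut plus descending linear scan with a single binary search (hand-written bisect_right) over the ascending sorted key list, indexing the largest key not exceeding longest_side (smallest key if below all).
import Mathlib
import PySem

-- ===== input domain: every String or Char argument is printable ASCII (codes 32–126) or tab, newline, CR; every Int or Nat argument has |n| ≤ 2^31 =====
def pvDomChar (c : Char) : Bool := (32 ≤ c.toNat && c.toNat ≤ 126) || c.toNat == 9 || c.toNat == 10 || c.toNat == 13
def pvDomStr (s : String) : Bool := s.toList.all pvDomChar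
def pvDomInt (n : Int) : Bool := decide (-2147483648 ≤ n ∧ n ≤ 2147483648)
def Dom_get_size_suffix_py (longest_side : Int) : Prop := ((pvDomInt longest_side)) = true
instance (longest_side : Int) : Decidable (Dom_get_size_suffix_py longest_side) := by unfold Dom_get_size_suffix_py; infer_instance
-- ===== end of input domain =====

set_option maxRecDepth 8000
set_option maxHeartbeats 1000000


-- B replaces A's exact-match shortcut plus descending linear scan with one binary search
-- (a hand-written bisect_right) over the ascending key list (objective: alternative).

-- ===== PORT A =====
def pvSIZES : PySem.Dict Int String :=
  PySem.Dict.ofList [(75, "s"), (150, "q"), (100, "t"), (240, "m"), (320, "n"), (500, "-"),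
                     (640, "z"), (800, "c"), (1024, "b"), (1600, "h"), (2048, "k")]

-- the for-loop with early return; after the loop `size` is the last element, so the trailing
-- `return SIZES[size]` uses it (the key list is a non-empty constant, so [] is unreachable)
def pvALoop (longest : Int) : List Int → String
  | [] => ""
  | s :: rest =>
    if longest ≥ s then PySem.Dict.getD pvSIZES s ""
    else match rest with
      | [] => PySem.Dict.getD pvSIZES s ""
      | _ :: _ => pvALoop longest rest

def get_size_suffix_py (longest_side : Int) : String :=
  match PySem.Dict.get? pvSIZES longest_side with
  | some v => v
  | none => pvALoop longest_side (PySem.List.sorted (pvSIZES.keys) (fun x => x) true)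

-- ===== PORT B =====
def pvKEYS : List Int := PySem.List.sorted (pvSIZES.keys) (fun x => x) false

-- Source B's hand-written _bisect_right while-loop (every index access is in range here)
def pvBisectGo (a : List Int) (x : Int) (lo hi : Nat) : Nat :=
  if _h : lo < hi then
    let mid := (lo + hi) / 2
    if x < a.getD mid 0 then pvBisectGo a x lo mid else pvBisectGo a x (mid + 1) hi
  else lo
termination_by hi - lo
decreasing_by all_goals omega

def get_size_suffix_py_alt (longest_side : Int) : String :=
  let i := pvBisectGo pvKEYS longest_side 0 pvKEYS.length
  if i = 0 then PySem.Dict.getD pvSIZES (pvKEYS.getD 0 0) ""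
  else PySem.Dict.getD pvSIZES (pvKEYS.getD (i - 1) 0) ""

-- ===== PRECONDITION & SPEC =====
def Spec_get_size_suffix_py (longest_side : Int) (out : String) : Prop := out = get_size_suffix_py_alt longest_side
instance (longest_side : Int) (out : String) : Decidable (Spec_get_size_suffix_py longest_side out) := by unfold Spec_get_size_suffix_py; infer_instance

-- ===== CLAIM (what is proved, stated in full; the proofs are below) =====
def Claim_equal_get_size_suffix_py : Prop := ∀ (longest_side : Int), Dom_get_size_suffix_py longest_side → Spec_get_size_suffix_py longest_side (get_size_suffix_py longest_side)

-- ===== LEMMAS AND PROOFS =====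

-- the common normal form both ports are reduced to: suffix of the largest key ≤ x ('s' below 75)
def pvAns (x : Int) : String :=
  if x < 100 then "s" else if x < 150 then "t" else if x < 240 then "q"
  else if x < 320 then "m" else if x < 500 then "n" else if x < 640 then "-"
  else if x < 800 then "z" else if x < 1024 then "c" else if x < 1600 then "b"
  else if x < 2048 then "h" else "k"

def pvK : List Int := [75,100,150,240,320,500,640,800,1024,1600,2048]

theorem pvBisect_eval (x : Int) : pvBisectGo pvK x 0 11 = (if x < 500 then (if x < 150 then (if x < 100 then (if x < 75 then 0 else 1) else 2) else (if x < 320 then (if x < 240 then 3 else 4) else 5)) else (if x < 1024 then (if x < 800 then (if x < 640 then 6 else 7) else 8) else (if x < 2048 then (if x < 1600 then 9 else 10) else 11))) := by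
  have h0_0 : pvBisectGo pvK x 0 0 = 0 := by rw [pvBisectGo.eq_def]; norm_num
  have h1_1 : pvBisectGo pvK x 1 1 = 1 := by rw [pvBisectGo.eq_def]; norm_num
  have h0_1 : pvBisectGo pvK x 0 1 = (if x < 75 then 0 else 1) := by
    rw [pvBisectGo.eq_def]; norm_num [show pvK[0]?.getD 0 = (75:Int) from by decide, h0_0, h1_1]
  have h2_2 : pvBisectGo pvK x 2 2 = 2 := by rw [pvBisectGo.eq_def]; norm_num
  have h0_2 : pvBisectGo pvK x 0 2 = (if x < 100 then (if x < 75 then 0 else 1) else 2) := by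
    rw [pvBisectGo.eq_def]; norm_num [show pvK[1]?.getD 0 = (100:Int) from by decide, h0_1, h2_2]
  have h3_3 : pvBisectGo pvK x 3 3 = 3 := by rw [pvBisectGo.eq_def]; norm_num
  have h4_4 : pvBisectGo pvK x 4 4 = 4 := by rw [pvBisectGo.eq_def]; norm_num
  have h3_4 : pvBisectGo pvK x 3 4 = (if x < 240 then 3 else 4) := by
    rw [pvBisectGo.eq_def]; norm_num [show pvK[3]?.getD 0 = (240:Int) from by decide, h3_3, h4_4]
  have h5_5 : pvBisectGo pvK x 5 5 = 5 := by rw [pvBisectGo.eq_def]; norm_num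
  have h3_5 : pvBisectGo pvK x 3 5 = (if x < 320 then (if x < 240 then 3 else 4) else 5) := by
    rw [pvBisectGo.eq_def]; norm_num [show pvK[4]?.getD 0 = (320:Int) from by decide, h3_4, h5_5]
  have h0_5 : pvBisectGo pvK x 0 5 = (if x < 150 then (if x < 100 then (if x < 75 then 0 else 1) else 2) else (if x < 320 then (if x < 240 then 3 else 4) else 5)) := by
    rw [pvBisectGo.eq_def]; norm_num [show pvK[2]?.getD 0 = (150:Int) from by decide, h0_2, h3_5]
  have h6_6 : pvBisectGo pvK x 6 6 = 6 := by rw [pvBisectGo.eq_def]; norm_num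
  have h7_7 : pvBisectGo pvK x 7 7 = 7 := by rw [pvBisectGo.eq_def]; norm_num
  have h6_7 : pvBisectGo pvK x 6 7 = (if x < 640 then 6 else 7) := by
    rw [pvBisectGo.eq_def]; norm_num [show pvK[6]?.getD 0 = (640:Int) from by decide, h6_6, h7_7]
  have h8_8 : pvBisectGo pvK x 8 8 = 8 := by rw [pvBisectGo.eq_def]; norm_num
  have h6_8 : pvBisectGo pvK x 6 8 = (if x < 800 then (if x < 640 then 6 else 7) else 8) := by
    rw [pvBisectGo.eq_def]; norm_num [show pvK[7]?.getD 0 = (800:Int) from by decide, h6_7, h8_8]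
  have h9_9 : pvBisectGo pvK x 9 9 = 9 := by rw [pvBisectGo.eq_def]; norm_num
  have h10_10 : pvBisectGo pvK x 10 10 = 10 := by rw [pvBisectGo.eq_def]; norm_num
  have h9_10 : pvBisectGo pvK x 9 10 = (if x < 1600 then 9 else 10) := by
    rw [pvBisectGo.eq_def]; norm_num [show pvK[9]?.getD 0 = (1600:Int) from by decide, h9_9, h10_10]
  have h11_11 : pvBisectGo pvK x 11 11 = 11 := by rw [pvBisectGo.eq_def]; norm_num
  have h9_11 : pvBisectGo pvK x 9 11 = (if x < 2048 then (if x < 1600 then 9 else 10) else 11) := by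
    rw [pvBisectGo.eq_def]; norm_num [show pvK[10]?.getD 0 = (2048:Int) from by decide, h9_10, h11_11]
  have h6_11 : pvBisectGo pvK x 6 11 = (if x < 1024 then (if x < 800 then (if x < 640 then 6 else 7) else 8) else (if x < 2048 then (if x < 1600 then 9 else 10) else 11)) := by
    rw [pvBisectGo.eq_def]; norm_num [show pvK[8]?.getD 0 = (1024:Int) from by decide, h6_8, h9_11]
  have h0_11 : pvBisectGo pvK x 0 11 = (if x < 500 then (if x < 150 then (if x < 100 then (if x < 75 then 0 else 1) else 2) else (if x < 320 then (if x < 240 then 3 else 4) else 5)) else (if x < 1024 then (if x < 800 then (if x < 640 then 6 else 7) else 8) else (if x < 2048 then (if x < 1600 then 9 else 10) else 11))) := by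
    rw [pvBisectGo.eq_def]; norm_num [show pvK[5]?.getD 0 = (500:Int) from by decide, h0_5, h6_11]
  exact h0_11

theorem pvAlt_eval (x : Int) : get_size_suffix_py_alt x = pvAns x := by
  have hK : pvKEYS = pvK := by decide
  unfold get_size_suffix_py_alt
  rw [hK, show pvK.length = 11 from rfl, pvBisect_eval x]
  by_cases h0 : x < 75
  · simp [pvAns, h0, show x < 100 from by omega, show x < 150 from by omega, show x < 240 from by omega, show x < 320 from by omega, show x < 500 from by omega, show x < 640 from by omega, show x < 800 from by omega, show x < 1024 from by omega, show x < 1600 from by omega, show x < 2048 from by omega]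
    decide
  by_cases h1 : x < 100
  · simp [pvAns, h0, h1, show x < 150 from by omega, show x < 240 from by omega, show x < 320 from by omega, show x < 500 from by omega, show x < 640 from by omega, show x < 800 from by omega, show x < 1024 from by omega, show x < 1600 from by omega, show x < 2048 from by omega]
    decide
  by_cases h2 : x < 150
  · simp [pvAns, h0, h1, h2, show x < 240 from by omega, show x < 320 from by omega, show x < 500 from by omega, show x < 640 from by omega, show x < 800 from by omega, show x < 1024 from by omega, show x < 1600 from by omega, show x < 2048 from by omega]
    decide
  by_cases h3 : x < 240
  · simp [pvAns, h0, h1, h2, h3, show x < 320 from by omega, show x < 500 from by omega, show x < 640 from by omega, show x < 800 from by omega, show x < 1024 from by omega, show x < 1600 from by omega, show x < 2048 from by omega]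
    decide
  by_cases h4 : x < 320
  · simp [pvAns, h0, h1, h2, h3, h4, show x < 500 from by omega, show x < 640 from by omega, show x < 800 from by omega, show x < 1024 from by omega, show x < 1600 from by omega, show x < 2048 from by omega]
    decide
  by_cases h5 : x < 500
  · simp [pvAns, h0, h1, h2, h3, h4, h5, show x < 640 from by omega, show x < 800 from by omega, show x < 1024 from by omega, show x < 1600 from by omega, show x < 2048 from by omega]
    decide
  by_cases h6 : x < 640
  · simp [pvAns, h0, h1, h2, h3, h4, h5, h6, show x < 800 from by omega, show x < 1024 from by omega, show x < 1600 from by omega, show x < 2048 from by omega]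
    decide
  by_cases h7 : x < 800
  · simp [pvAns, h0, h1, h2, h3, h4, h5, h6, h7, show x < 1024 from by omega, show x < 1600 from by omega, show x < 2048 from by omega]
    decide
  by_cases h8 : x < 1024
  · simp [pvAns, h0, h1, h2, h3, h4, h5, h6, h7, h8, show x < 1600 from by omega, show x < 2048 from by omega]
    decide
  by_cases h9 : x < 1600
  · simp [pvAns, h0, h1, h2, h3, h4, h5, h6, h7, h8, h9, show x < 2048 from by omega]
    decide
  by_cases h10 : x < 2048
  · simp [pvAns, h0, h1, h2, h3, h4, h5, h6, h7, h8, h9, h10]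
    decide
  · simp [pvAns, h0, h1, h2, h3, h4, h5, h6, h7, h8, h9, h10]
    decide

theorem pvA_eval (x : Int) : get_size_suffix_py x = pvAns x := by
  have hD : PySem.List.sorted (pvSIZES.keys) (fun x => x) true = [2048,1600,1024,800,640,500,320,240,150,100,75] := by decide
  unfold get_size_suffix_py
  rw [hD]
  rcases h : PySem.Dict.get? pvSIZES x with _ | v
  · show pvALoop x [2048,1600,1024,800,640,500,320,240,150,100,75] = pvAns x
    by_cases g0 : x ≥ 2048
    · simp [pvALoop, pvAns, g0, show ¬ x < 100 from by omega, show ¬ x < 150 from by omega, show ¬ x < 240 from by omega, show ¬ x < 320 from by omega, show ¬ x < 500 from by omega, show ¬ x < 640 from by omega, show ¬ x < 800 from by omega, show ¬ x < 1024 from by omega, show ¬ x < 1600 from by omega, show ¬ x < 2048 from by omega] <;> decide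
    by_cases g1 : x ≥ 1600
    · simp [pvALoop, pvAns, g0, g1, show ¬ x < 100 from by omega, show ¬ x < 150 from by omega, show ¬ x < 240 from by omega, show ¬ x < 320 from by omega, show ¬ x < 500 from by omega, show ¬ x < 640 from by omega, show ¬ x < 800 from by omega, show ¬ x < 1024 from by omega, show ¬ x < 1600 from by omega, show x < 2048 from by omega] <;> decide
    by_cases g2 : x ≥ 1024
    · simp [pvALoop, pvAns, g0, g1, g2, show ¬ x < 100 from by omega, show ¬ x < 150 from by omega, show ¬ x < 240 from by omega, show ¬ x < 320 from by omega, show ¬ x < 500 from by omega, show ¬ x < 640 from by omega, show ¬ x < 800 from by omega, show ¬ x < 1024 from by omega, show x < 1600 from by omega, show x < 2048 from by omega] <;> decide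
    by_cases g3 : x ≥ 800
    · simp [pvALoop, pvAns, g0, g1, g2, g3, show ¬ x < 100 from by omega, show ¬ x < 150 from by omega, show ¬ x < 240 from by omega, show ¬ x < 320 from by omega, show ¬ x < 500 from by omega, show ¬ x < 640 from by omega, show ¬ x < 800 from by omega, show x < 1024 from by omega, show x < 1600 from by omega, show x < 2048 from by omega] <;> decide
    by_cases g4 : x ≥ 640
    · simp [pvALoop, pvAns, g0, g1, g2, g3, g4, show ¬ x < 100 from by omega, show ¬ x < 150 from by omega, show ¬ x < 240 from by omega, show ¬ x < 320 from by omega, show ¬ x < 500 from by omega, show ¬ x < 640 from by omega, show x < 800 from by omega, show x < 1024 from by omega, show x < 1600 from by omega, show x < 2048 from by omega] <;> decide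
    by_cases g5 : x ≥ 500
    · simp [pvALoop, pvAns, g0, g1, g2, g3, g4, g5, show ¬ x < 100 from by omega, show ¬ x < 150 from by omega, show ¬ x < 240 from by omega, show ¬ x < 320 from by omega, show ¬ x < 500 from by omega, show x < 640 from by omega, show x < 800 from by omega, show x < 1024 from by omega, show x < 1600 from by omega, show x < 2048 from by omega] <;> decide
    by_cases g6 : x ≥ 320
    · simp [pvALoop, pvAns, g0, g1, g2, g3, g4, g5, g6, show ¬ x < 100 from by omega, show ¬ x < 150 from by omega, show ¬ x < 240 from by omega, show ¬ x < 320 from by omega, show x < 500 from by omega, show x < 640 from by omega, show x < 800 from by omega, show x < 1024 from by omega, show x < 1600 from by omega, show x < 2048 from by omega] <;> decide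
    by_cases g7 : x ≥ 240
    · simp [pvALoop, pvAns, g0, g1, g2, g3, g4, g5, g6, g7, show ¬ x < 100 from by omega, show ¬ x < 150 from by omega, show ¬ x < 240 from by omega, show x < 320 from by omega, show x < 500 from by omega, show x < 640 from by omega, show x < 800 from by omega, show x < 1024 from by omega, show x < 1600 from by omega, show x < 2048 from by omega] <;> decide
    by_cases g8 : x ≥ 150
    · simp [pvALoop, pvAns, g0, g1, g2, g3, g4, g5, g6, g7, g8, show ¬ x < 100 from by omega, show ¬ x < 150 from by omega, show x < 240 from by omega, show x < 320 from by omega, show x < 500 from by omega, show x < 640 from by omega, show x < 800 from by omega, show x < 1024 from by omega, show x < 1600 from by omega, show x < 2048 from by omega] <;> decide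
    by_cases g9 : x ≥ 100
    · simp [pvALoop, pvAns, g0, g1, g2, g3, g4, g5, g6, g7, g8, g9, show ¬ x < 100 from by omega, show x < 150 from by omega, show x < 240 from by omega, show x < 320 from by omega, show x < 500 from by omega, show x < 640 from by omega, show x < 800 from by omega, show x < 1024 from by omega, show x < 1600 from by omega, show x < 2048 from by omega] <;> decide
    by_cases g10 : x ≥ 75
    · simp [pvALoop, pvAns, g0, g1, g2, g3, g4, g5, g6, g7, g8, g9, g10, show x < 100 from by omega, show x < 150 from by omega, show x < 240 from by omega, show x < 320 from by omega, show x < 500 from by omega, show x < 640 from by omega, show x < 800 from by omega, show x < 1024 from by omega, show x < 1600 from by omega, show x < 2048 from by omega] <;> decide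
    · simp [pvALoop, pvAns, g0, g1, g2, g3, g4, g5, g6, g7, g8, g9, g10, show x < 100 from by omega, show x < 150 from by omega, show x < 240 from by omega, show x < 320 from by omega, show x < 500 from by omega, show x < 640 from by omega, show x < 800 from by omega, show x < 1024 from by omega, show x < 1600 from by omega, show x < 2048 from by omega] <;> decide
  · show v = pvAns x
    have hmk : pvSIZES = PySem.Dict.mk [(75, "s"), (150, "q"), (100, "t"), (240, "m"), (320, "n"), (500, "-"), (640, "z"), (800, "c"), (1024, "b"), (1600, "h"), (2048, "k")] := by decide
    rw [hmk] at h
    simp only [PySem.Dict.get?_mk_cons] at h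
    split_ifs at h with e0 e1 e2 e3 e4 e5 e6 e7 e8 e9 e10
    · rw [beq_iff_eq] at e0; subst e0; injection h with h; subst h; decide
    · rw [beq_iff_eq] at e1; subst e1; injection h with h; subst h; decide
    · rw [beq_iff_eq] at e2; subst e2; injection h with h; subst h; decide
    · rw [beq_iff_eq] at e3; subst e3; injection h with h; subst h; decide
    · rw [beq_iff_eq] at e4; subst e4; injection h with h; subst h; decide
    · rw [beq_iff_eq] at e5; subst e5; injection h with h; subst h; decide
    · rw [beq_iff_eq] at e6; subst e6; injection h with h; subst h; decide
    · rw [beq_iff_eq] at e7; subst e7; injection h with h; subst h; decide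
    · rw [beq_iff_eq] at e8; subst e8; injection h with h; subst h; decide
    · rw [beq_iff_eq] at e9; subst e9; injection h with h; subst h; decide
    · rw [beq_iff_eq] at e10; subst e10; injection h with h; subst h; decide
    · simp [PySem.Dict.get?] at h

-- ===== VERDICT (by name: the statement is the Claim_ definition above) =====
theorem get_size_suffix_py_spec : Claim_equal_get_size_suffix_py := by
  intro x _
  unfold Spec_get_size_suffix_py
  rw [pvA_eval, pvAlt_eval]
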